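-- pv_equiv track=rewrite | github.com/c-stap/gpxtractor | gpxtractor/area_graphs.py | braille_columns
-- ===== SOURCE A (Python) =====
-- import itertools
--
-- EMPTY_BRAILLE_CHAR = 0x2800
--
-- FULL_BRAILLE_CHAR = 0x28FF
--
-- def braille_char(left: int, right: int) -> str:
--     left = min(left, 4)
--     right = min(right, 4)
--
--     left = 0 if left < 0 else left
--     right = 0 if right < 0 else right
--
--     left_dots = [0] * (4 - left) + [1] * left
--     right_dots = [0] * (4 - right) + [1] * right
--
--     # Unicode position left (top to bottom) 1, 2, 3, 7
--     # Unicode position right (top to bottom) 4, 5, 6, 8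
--     dot_positions = [0, 1, 2, 6, 3, 4, 5, 7]
--     dots = [0] * 8
--     for dot, position in zip(left_dots + right_dots, dot_positions):
--         dots[position] = dot
--
--     bit_diff = sum((1 << i) for i, d in enumerate(dots) if d)
--
--     return chr(EMPTY_BRAILLE_CHAR + bit_diff)
--
-- def braille_columns(data: list[int]) -> str:
--     max_val = max(data)
--     n_lines = max_val // 4 + 1 if max_val % 4 else max_val // 4
--     lines = []
--     amount_plotted = 0
--     for i in range(n_lines):
--         line = []
--         for left_col, right_col in itertools.zip_longest(
--             data[::2], data[1::2], fillvalue=0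
--         ):
--             left = left_col - amount_plotted
--             right = right_col - amount_plotted
--             # left = 0 if left < 0 else left
--             # right = 0 if right < 0 else right
--
--             if left >= 4 and right >= 4:
--                 line.append(chr(FULL_BRAILLE_CHAR))
--             else:
--                 line.append(braille_char(left, right))
--
--         line = "".join(char for char in line)
--         lines.insert(0, line)
--         amount_plotted += 4
--     return lines
-- ===== SOURCE B (Python) =====
-- def braille_columns(data: list[int]) -> str:
--     # Column-major: build each braille column bottom-up by run-length (divmod),
--     # pair the left/right half-column masks, then transpose into rows.
--     LEFT = (0, 0x40, 0x44, 0x46, 0x47)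
--     RIGHT = (0, 0x80, 0xA0, 0xB0, 0xB8)
--     n = -(-max(data) // 4)
--
--     def stack(h, masks):
--         # bottom-up masks of one half-column: full cells, one partial, blanks
--         if h < 0:
--             h = 0
--         q, rem = divmod(h, 4)
--         part = [masks[rem]] if rem else []
--         return [masks[4]] * q + part + [0] * (n - q - len(part))
--
--     cols = []
--     for i in range(0, len(data), 2):
--         right = data[i + 1] if i + 1 < len(data) else 0
--         lm = stack(data[i], LEFT)
--         rm = stack(right, RIGHT)
--         cols.append([chr(0x2800 + a + b) for a, b in zip(lm, rm)][::-1])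
--     return ["".join(row) for row in zip(*cols)]
-- ===== Notes on version B (the rewrite author's own statement) =====
-- stated objective: alternative
-- what changed: A renders row-major (outer loop over rows, inner zip_longest over column pairs, per-cell dot-list/bit-loop braille_char); B builds each braille column bottom-up by run-length construction (divmod into full cells, one partial mask, blank padding) from two 5-entry mask tables, combines the left/right half-column stacks, and transposes with zip(*cols) into rows.
import Mathlib
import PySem

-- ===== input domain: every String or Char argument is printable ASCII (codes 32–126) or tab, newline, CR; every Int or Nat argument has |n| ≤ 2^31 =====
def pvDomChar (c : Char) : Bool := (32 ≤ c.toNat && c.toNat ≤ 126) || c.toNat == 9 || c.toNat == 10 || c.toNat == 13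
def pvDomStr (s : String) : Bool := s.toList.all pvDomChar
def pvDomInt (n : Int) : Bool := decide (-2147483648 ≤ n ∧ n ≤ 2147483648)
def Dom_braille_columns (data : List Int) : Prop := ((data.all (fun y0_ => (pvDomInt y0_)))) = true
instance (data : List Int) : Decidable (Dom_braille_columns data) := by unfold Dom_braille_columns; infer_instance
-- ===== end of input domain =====

-- B renders column-major instead of row-major: each braille column is built bottom-up by
-- run-length construction (full cells, one partial mask, blank padding) from two 5-entry
-- mask tables, and the columns are transposed into rows; objective: alternative.

-- ===== PORT A =====

-- itertools.zip_longest(xs, ys, fillvalue=0), ported by hand (exact: pads the shorter list with 0)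
def zipLongest0 : List Int → List Int → List (Int × Int)
  | [], [] => []
  | x :: xs, [] => (x, 0) :: zipLongest0 xs []
  | [], y :: ys => (0, y) :: zipLongest0 [] ys
  | x :: xs, y :: ys => (x, y) :: zipLongest0 xs ys

def braille_char (left right : Int) : Char :=
  let left := min left 4
  let right := min right 4
  let left := if left < 0 then 0 else left
  let right := if right < 0 then 0 else right
  let left_dots : List Int := List.replicate (4 - left).toNat 0 ++ List.replicate left.toNat 1
  let right_dots : List Int := List.replicate (4 - right).toNat 0 ++ List.replicate right.toNat 1
  let dot_positions : List Nat := [0, 1, 2, 6, 3, 4, 5, 7]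
  let dots := ((left_dots ++ right_dots).zip dot_positions).foldl
      (fun (d : List Int) (p : Int × Nat) => d.set p.2 p.1) (List.replicate 8 0)
  let bit_diff : Nat := (PySem.List.enumerate dots 0).foldl
      (fun (acc : Nat) (p : Int × Int) => if p.2 ≠ 0 then acc + (1 <<< p.1.toNat) else acc) 0
  Char.ofNat (0x2800 + bit_diff)

def braille_columns (data : List Int) : List String :=
  match PySem.List.max? data (fun x => x) with
  | none => []  -- max([]) raises ValueError; excluded by Pre_braille_columns
  | some max_val =>
    let n_lines := if PySem.Int.mod max_val 4 ≠ 0 then PySem.Int.floordiv max_val 4 + 1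
                   else PySem.Int.floordiv max_val 4
    let evens := (PySem.List.slice? data none none 2).getD []   -- data[::2] (step 2 ≠ 0, never raises)
    let odds := (PySem.List.slice? data (some 1) none 2).getD []   -- data[1::2]
    ((PySem.List.pyRange 0 n_lines 1).foldl
      (fun (st : List String × Int) _i =>
        let line := (zipLongest0 evens odds).foldl
          (fun (acc : List Char) lr =>
            acc ++ [if 4 ≤ lr.1 - st.2 ∧ 4 ≤ lr.2 - st.2
                    then Char.ofNat 0x28FF
                    else braille_char (lr.1 - st.2) (lr.2 - st.2)]) []
        (String.mk line :: st.1, st.2 + 4)) (([] : List String), (0 : Int))).1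

-- ===== PORT B =====

def pvLEFT : List Nat := [0, 0x40, 0x44, 0x46, 0x47]
def pvRIGHT : List Nat := [0, 0x80, 0xA0, 0xB0, 0xB8]

-- Source B's stack(h, masks): bottom-up masks of one half-column (q full cells, one partial, blanks)
def stackB (n h : Int) (masks : List Nat) : List Nat :=
  let h := if h < 0 then 0 else h
  let q := PySem.Int.floordiv h 4
  let rem := PySem.Int.mod h 4
  let part := if rem ≠ 0 then [masks.getD rem.toNat 0] else []
  List.replicate q.toNat (masks.getD 4 0) ++ part ++
    List.replicate (n - q - (part.length : Int)).toNat 0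

-- one column pair: combine the two half-column mask stacks, top-down ([::-1])
def colChars (n l r : Int) : List Char :=
  (((stackB n l pvLEFT).zip (stackB n r pvRIGHT)).map
    (fun p => Char.ofNat (0x2800 + p.1 + p.2))).reverse

-- the 'for i in range(0, len(data), 2)' loop, consuming data two elements at a time
def colsB (n : Int) : List Int → List (List Char)
  | [] => []
  | [x] => [colChars n x 0]
  | x :: y :: r => colChars n x y :: colsB n r

-- zip(*cols): recursion on the first column; stops at the shortest column
def pyZipGo : List Char → List (List Char) → List (List Char)
  | [], _ => []
  | _ :: f, cols =>
      if cols.any List.isEmpty then []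
      else cols.map (fun l => l.headD ' ') :: pyZipGo f (cols.map List.tail)

-- zip(*cols): Python's zip over the unpacked column list (zip() of no columns is empty)
def pyZipStar (cols : List (List Char)) : List (List Char) :=
  match cols with
  | [] => []
  | c :: _ => pyZipGo c cols

def braille_columns_alt (data : List Int) : List String :=
  match PySem.List.max? data (fun x => x) with
  | none => []  -- max([]) raises ValueError; excluded by Pre_braille_columns
  | some m =>
    let n := -(PySem.Int.floordiv (-m) 4)
    (pyZipStar (colsB n data)).map String.mk

-- ===== PRECONDITION & SPEC =====

-- Pre_ excludes only the empty list, on which Python's max(data) raises ValueError in both A and B.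
def Pre_braille_columns (data : List Int) : Prop := data ≠ []
instance (data : List Int) : Decidable (Pre_braille_columns data) := by
  unfold Pre_braille_columns; infer_instance

def pvWitness_braille_columns : List Int := [5, 2, 1]

def Spec_braille_columns (data : List Int) (out : List String) : Prop := out = braille_columns_alt data
instance (data : List Int) (out : List String) : Decidable (Spec_braille_columns data out) := by
  unfold Spec_braille_columns; infer_instance

-- ===== CLAIM (what is proved, stated in full; the proofs are below) =====
def Claim_equal_braille_columns : Prop := ∀ (data : List Int), Dom_braille_columns data → Pre_braille_columns data → Spec_braille_columns data (braille_columns data)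

-- ===== LEMMAS AND PROOFS =====

-- the clamped fill level of a half-column at row k (bottom-up), 0..4
def levelB (v k : Int) : Nat :=
  if v - 4 * k < 0 then 0 else if v - 4 * k > 4 then 4 else (v - 4 * k).toNat

-- the braille char of a column pair at row k, written through the mask tables
def rowChar (l r k : Int) : Char :=
  Char.ofNat (0x2800 + pvLEFT.getD (levelB l k) 0 + pvRIGHT.getD (levelB r k) 0)

-- the column pairs (data[0],data[1]), (data[2],data[3]), …, last padded with 0
def pairUp : List Int → List (Int × Int)
  | [] => []
  | [x] => [(x, 0)]
  | x :: y :: r => (x, y) :: pairUp r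

-- data[::2]: every second element
def everyOther : List Int → List Int
  | [] => []
  | [x] => [x]
  | x :: _ :: r => x :: everyOther r

-- data[1::2]
def oddsOf : List Int → List Int
  | [] => []
  | [_] => []
  | _ :: y :: r => y :: oddsOf r

lemma filterMap_evens (xs : List Int) :
    List.filterMap (fun k : Nat => xs[2*k]?) (List.range ((xs.length+1)/2)) = everyOther xs := by
  fun_induction everyOther xs with
  | case1 => simp
  | case2 x => simp [List.range_succ]
  | case3 x y r ih =>
    have h : (( x :: y :: r).length + 1)/2 = (r.length+1)/2 + 1 := by simp; omega
    rw [h, List.range_succ_eq_map, List.filterMap_cons, List.filterMap_map]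
    simp only [Function.comp_def]
    have : ∀ k : Nat, (x :: y :: r)[2*(k+1)]? = r[2*k]? := by
      intro k
      have : 2*(k+1) = 2*k+1+1 := by omega
      rw [this, List.getElem?_cons_succ, List.getElem?_cons_succ]
    simp only [this]
    simp [ih]

lemma slice2_evens (xs : List Int) : PySem.List.slice? xs none none 2 = some (everyOther xs) := by
  rw [← filterMap_evens]
  unfold PySem.List.slice? PySem.List.sliceIndices
  norm_num
  have hc : (if 0 < xs.length then (((xs.length:Int) + 2 - 1) / 2).toNat else 0) = (xs.length + 1)/2 := by
    split_ifs with h <;> omega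
  rw [hc]
  refine List.filterMap_congr ?_
  intro k _
  have : ((2 * (k:Int))).toNat = 2*k := by omega
  rw [this]

lemma filterMap_odds (xs : List Int) :
    List.filterMap (fun k : Nat => xs[2*k+1]?) (List.range (xs.length/2)) = oddsOf xs := by
  fun_induction oddsOf xs with
  | case1 => simp
  | case2 x => simp
  | case3 x y r ih =>
    have h : (( x :: y :: r).length)/2 = r.length/2 + 1 := by simp; omega
    rw [h, List.range_succ_eq_map, List.filterMap_cons, List.filterMap_map]
    simp only [Function.comp_def]
    have : ∀ k : Nat, (x :: y :: r)[2*(k+1)+1]? = r[2*k+1]? := by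
      intro k
      have : 2*(k+1)+1 = (2*k+1)+1+1 := by omega
      rw [this, List.getElem?_cons_succ, List.getElem?_cons_succ]
    simp only [this]
    simp [ih]

lemma slice2_odds (xs : List Int) : PySem.List.slice? xs (some 1) none 2 = some (oddsOf xs) := by
  rw [← filterMap_odds]
  unfold PySem.List.slice? PySem.List.sliceIndices
  norm_num
  have hs : min 1 (xs.length : Int) = if xs.length = 0 then 0 else 1 := by
    split_ifs with h <;> omega
  rw [hs]
  by_cases h0 : xs.length = 0
  · have h0' : xs = [] := by cases xs <;> simp_all
    subst h0'; simp
  · rw [if_neg h0]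
    split_ifs with h1
    · have hc : (((xs.length:Int) - 1 + 2 - 1) / 2).toNat = xs.length / 2 := by omega
      rw [hc]
      refine List.filterMap_congr ?_
      intro k _
      have : ((1 + 2 * (k:Int))).toNat = 2*k+1 := by omega
      rw [this]
    · have : xs.length / 2 = 0 := by omega
      simp [this]

lemma zipLongest0_pairUp (xs : List Int) :
    zipLongest0 (everyOther xs) (oddsOf xs) = pairUp xs := by
  fun_induction pairUp xs with
  | case1 => simp [everyOther, oddsOf, zipLongest0]
  | case2 x => simp [everyOther, oddsOf, zipLongest0]
  | case3 x y r ih => simp [everyOther, oddsOf, zipLongest0, ih]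

lemma levelB_le (v k : Int) : levelB v k ≤ 4 := by
  unfold levelB; split_ifs <;> omega

lemma braille_char_clamp (l r : Int) :
    braille_char l r
      = braille_char (if min l 4 < 0 then 0 else min l 4) (if min r 4 < 0 then 0 else min r 4) := by
  simp only [braille_char]
  have e1 : ∀ v : Int, (if min (if min v 4 < 0 then 0 else min v 4) 4 < 0 then (0:Int)
      else min (if min v 4 < 0 then 0 else min v 4) 4) = (if min v 4 < 0 then 0 else min v 4) := by
    intro v; simp only [Int.min_def]; split_ifs <;> omega
  rw [e1, e1]

lemma braille_char_core (a b : Nat) (ha : a ≤ 4) (hb : b ≤ 4) :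
    braille_char (a : Int) (b : Int)
      = Char.ofNat (0x2800 + pvLEFT.getD a 0 + pvRIGHT.getD b 0) := by
  interval_cases a <;> interval_cases b <;> decide

lemma clamp_levelB (v : Int) :
    (if min v 4 < 0 then (0:Int) else min v 4) = ((levelB v 0 : Nat) : Int) := by
  unfold levelB
  simp only [Int.min_def]
  split_ifs <;> omega

lemma braille_char_eq (l r : Int) :
    braille_char l r
      = Char.ofNat (0x2800 + pvLEFT.getD (levelB l 0) 0 + pvRIGHT.getD (levelB r 0) 0) := by
  rw [braille_char_clamp, clamp_levelB, clamp_levelB]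
  exact braille_char_core _ _ (levelB_le l 0) (levelB_le r 0)

lemma levelB_shift (v k : Int) : levelB v k = levelB (v - 4 * k) 0 := by
  unfold levelB
  norm_num

lemma cell_eq (l r k : Int) :
    (if 4 ≤ l - 4 * k ∧ 4 ≤ r - 4 * k then Char.ofNat 0x28FF
     else braille_char (l - 4 * k) (r - 4 * k)) = rowChar l r k := by
  unfold rowChar
  rw [levelB_shift l k, levelB_shift r k]
  split_ifs with h
  · have h1 : levelB (l - 4 * k) 0 = 4 := by unfold levelB; split_ifs <;> omega
    have h2 : levelB (r - 4 * k) 0 = 4 := by unfold levelB; split_ifs <;> omega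
    rw [h1, h2]; decide
  · exact braille_char_eq _ _

lemma n_lines_eq (m : Int) :
    (if PySem.Int.mod m 4 ≠ 0 then PySem.Int.floordiv m 4 + 1 else PySem.Int.floordiv m 4)
      = -(PySem.Int.floordiv (-m) 4) := by
  have hdm := PySem.Int.floordiv_mul_add_mod m 4
  have h0 := PySem.Int.mod_nonneg m (b := 4) (by omega)
  have h4 := PySem.Int.mod_lt m (b := 4) (by omega)
  symm
  rw [PySem.Int.neg_floordiv_neg_eq_iff_of_pos (by omega : (0:Int) < 4)]
  split_ifs with h <;> constructor <;> omega

-- the ceiling m ≤ 4 * ceil(m/4), and positivity of the ceiling for positive m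
lemma ceil4_bounds (m : Int) :
    m ≤ 4 * (-(PySem.Int.floordiv (-m) 4)) ∧ (1 ≤ m → 1 ≤ -(PySem.Int.floordiv (-m) 4)) := by
  have hdm := PySem.Int.floordiv_mul_add_mod (-m) 4
  have h0 := PySem.Int.mod_nonneg (-m) (b := 4) (by omega)
  have h4 := PySem.Int.mod_lt (-m) (b := 4) (by omega)
  constructor <;> omega

-- the outer loop of A: repeated insert(0, row) over any list builds the reversed map of rows
lemma foldA {α : Type} (row : Int → α) :
    ∀ (l : List Int) (ls : List α) (a : Int),
      (l.foldl (fun (st : List α × Int) _ => (row st.2 :: st.1, st.2 + 4)) (ls, a))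
        = (((List.range l.length).reverse.map (fun i : Nat => row (a + 4 * (i : Int)))) ++ ls,
           a + 4 * (l.length : Int)) := by
  intro l
  induction l with
  | nil => intro ls a; simp
  | cons x t ih =>
    intro ls a
    rw [List.foldl_cons, ih (row a :: ls) (a + 4), Prod.mk.injEq]
    constructor
    · rw [List.length_cons, List.range_succ_eq_map, List.reverse_cons, List.map_append,
        List.append_assoc]
      simp only [List.map_cons, List.map_nil, List.singleton_append]
      congr 1
      · rw [← List.map_reverse, List.map_map]
        refine List.map_congr_left ?_
        intro i _
        simp only [Function.comp_def]
        congr 1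
        push_cast
        ring
      · congr 2
        norm_num
    · rw [List.length_cons]
      push_cast
      ring

lemma reverse_range_map {α : Type} (g : Nat → α) (N : Nat) :
    (List.range N).reverse.map g = (List.range N).map (fun k => g (N - 1 - k)) := by
  rw [List.range_eq_range', List.reverse_range', List.map_map]
  simp [Function.comp_def, List.range_eq_range']

-- the run-length stack equals the per-row clamped levels, given the height fits the grid
lemma stack_eq (n h : Int) (masks : List Nat) (h0 : masks.getD 0 0 = 0)
    (hh : max h 0 ≤ 4 * max n 0) :
    stackB n h masks = (List.range n.toNat).map (fun k : Nat => masks.getD (levelB h (k:Int)) 0) := by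
  simp only [stackB]
  by_cases hneg : h < 0
  · simp only [if_pos hneg]
    have hq : PySem.Int.floordiv (0:Int) 4 = 0 := by decide
    have hr : PySem.Int.mod (0:Int) 4 = 0 := by decide
    simp only [hq, hr, ne_eq, not_true_eq_false, if_false, Int.toNat_zero, List.replicate_zero,
      List.nil_append, List.length_nil, Nat.cast_zero, Int.sub_zero]
    apply List.ext_getElem
    · simp
    · intro i hi1 hi2
      rw [List.getElem_replicate, List.getElem_map, List.getElem_range]
      have : levelB h i = 0 := by
        unfold levelB
        have : h - 4 * (i:Int) < 0 := by omega
        split_ifs <;> omega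
      rw [this, h0]
  · simp only [if_neg hneg]
    have hrel := PySem.Int.floordiv_mul_add_mod h 4
    have hm0 := PySem.Int.mod_nonneg h (b := 4) (by omega)
    have hm4 := PySem.Int.mod_lt h (b := 4) (by omega)
    have hq0 : 0 ≤ PySem.Int.floordiv h 4 := by omega
    by_cases hz : PySem.Int.mod h 4 = 0
    · simp only [hz, ne_eq, not_true_eq_false, if_false, List.length_nil, List.append_nil,
        Nat.cast_zero, Int.sub_zero]
      apply List.ext_getElem
      · simp; omega
      · intro i hi1 hi2
        rw [List.getElem_map, List.getElem_range]
        by_cases hlt : i < (PySem.Int.floordiv h 4).toNat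
        · rw [List.getElem_append_left (by simpa using hlt), List.getElem_replicate]
          have : levelB h i = 4 := by
            unfold levelB
            have : 4 ≤ h - 4 * (i:Int) := by omega
            split_ifs <;> omega
          rw [this]
        · rw [List.getElem_append_right (by simpa using hlt), List.getElem_replicate]
          have : levelB h i = 0 := by
            unfold levelB
            have : h - 4 * (i:Int) ≤ 0 := by omega
            split_ifs <;> omega
          rw [this, h0]
    · simp only [hz, ne_eq, not_false_eq_true, if_true, List.length_cons, List.length_nil,
        Nat.cast_one]
      rw [List.append_assoc]
      apply List.ext_getElem
      · simp; omega
      · intro i hi1 hi2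
        simp only [List.length_append, List.length_replicate, List.length_cons,
          List.length_nil] at hi1
        rw [List.getElem_map, List.getElem_range]
        by_cases hlt : i < (PySem.Int.floordiv h 4).toNat
        · rw [List.getElem_append_left (by simpa using hlt), List.getElem_replicate]
          have : levelB h i = 4 := by
            unfold levelB
            have : 4 ≤ h - 4 * (i:Int) := by omega
            split_ifs <;> omega
          rw [this]
        · rw [List.getElem_append_right (by simpa using hlt)]
          by_cases heq : i = (PySem.Int.floordiv h 4).toNat
          · have hidx : i - (List.replicate (PySem.Int.floordiv h 4).toNat (masks.getD 4 0)).length = 0 := by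
              simp [heq]
            simp only [hidx]
            rw [List.getElem_append_left (by simp)]
            simp only [List.getElem_cons_zero]
            have : levelB h i = (PySem.Int.mod h 4).toNat := by
              unfold levelB
              have : h - 4 * (i:Int) = PySem.Int.mod h 4 := by omega
              split_ifs <;> omega
            rw [this]
          · rw [List.getElem_append_right (by simp; omega), List.getElem_replicate]
            have : levelB h i = 0 := by
              unfold levelB
              have : h - 4 * (i:Int) < 0 := by omega
              split_ifs <;> omega
            rw [this, h0]

lemma colChars_eq (n l r : Int) (hl : max l 0 ≤ 4 * max n 0) (hr : max r 0 ≤ 4 * max n 0) :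
    colChars n l r = ((List.range n.toNat).map (fun k : Nat => rowChar l r (k:Int))).reverse := by
  unfold colChars
  rw [stack_eq n l pvLEFT rfl hl, stack_eq n r pvRIGHT rfl hr, List.zip_map', List.map_map]
  rfl

lemma colsB_eq (n : Int) (data : List Int) :
    colsB n data = (pairUp data).map (fun p => colChars n p.1 p.2) := by
  fun_induction pairUp data with
  | case1 => rfl
  | case2 x => rfl
  | case3 x y r ih => simp [colsB, pairUp, ih]

lemma pairUp_mem (data : List Int) (p : Int × Int) (hp : p ∈ pairUp data) :
    p.1 ∈ data ∧ (p.2 ∈ data ∨ p.2 = 0) := by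
  fun_induction pairUp data with
  | case1 => simp [pairUp] at hp
  | case2 x => simp [pairUp] at hp; simp [hp]
  | case3 x y r ih =>
    simp only [pairUp, List.mem_cons] at hp
    rcases hp with h | h
    · subst h; simp
    · have := ih h
      simp only [List.mem_cons]
      tauto

lemma pairUp_ne_nil (data : List Int) (h : data ≠ []) : pairUp data ≠ [] := by
  match data with
  | [] => exact absurd rfl h
  | [x] => simp [pairUp]
  | x :: y :: r => simp [pairUp]

-- zip(*cols) on a nonempty family of equal-length columns is the transpose
lemma pyZipGo_eq (N : Nat) : ∀ (f : List Char) (cols : List (List Char)),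
    f.length = N → (∀ c ∈ cols, c.length = N) → cols ≠ [] →
    pyZipGo f cols = (List.range N).map (fun k => cols.map (fun c => c.getD k ' ')) := by
  induction N with
  | zero =>
    intro f cols hf _ _
    match f, hf with
    | [], _ => simp [pyZipGo]
  | succ N ih =>
    intro f cols hf hc hne
    match f, hf with
    | x :: f', hf =>
      have hany : cols.any List.isEmpty = false := by
        rw [List.any_eq_false]
        intro c hcmem
        have := hc c hcmem
        simp [List.isEmpty_iff]
        intro hcnil
        rw [hcnil] at this
        simp at this
      rw [pyZipGo, hany]
      simp only [Bool.false_eq_true, if_false]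
      have hrec := ih f' (cols.map List.tail) (by simpa using hf)
        (by
          intro c hcmem
          rw [List.mem_map] at hcmem
          obtain ⟨c', hc', rfl⟩ := hcmem
          have := hc c' hc'
          simp [List.length_tail, this])
        (by simpa using hne)
      rw [hrec, List.range_succ_eq_map, List.map_cons, List.map_map]
      congr 1
      · refine List.map_congr_left ?_
        intro c hcmem
        have hlen := hc c hcmem
        match c, hlen with
        | a :: c', _ => simp
      · refine List.map_congr_left ?_
        intro k _
        simp only [Function.comp_def, List.map_map]
        refine List.map_congr_left ?_
        intro c hcmem
        have hlen := hc c hcmem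
        match c, hlen with
        | a :: c', _ => simp

-- ===== VERDICT is below; main proof =====

theorem braille_columns_spec : Claim_equal_braille_columns := by
  intro data hdom hpre
  unfold Spec_braille_columns braille_columns braille_columns_alt
  cases hmax : PySem.List.max? data (fun x => x) with
  | none => exact absurd ((PySem.List.max?_eq_none_iff data (fun x => x)).mp hmax) hpre
  | some m =>
    simp only [slice2_evens, slice2_odds, Option.getD_some, n_lines_eq m, zipLongest0_pairUp,
      PySem.List.foldl_append_singleton_eq_map, List.nil_append]
    set c : Int := -PySem.Int.floordiv (-m) 4 with hc
    have hub : ∀ y ∈ data, y ≤ m := by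
      intro y hy
      exact PySem.List.max?_isMax hmax y hy
    obtain ⟨hm4, hmc⟩ := ceil4_bounds m
    rw [← hc] at hm4 hmc
    set N : Nat := c.toNat with hN
    -- bound every pair component by the grid height
    have hbound : ∀ p ∈ pairUp data, max p.1 0 ≤ 4 * max c 0 ∧ max p.2 0 ≤ 4 * max c 0 := by
      intro p hp
      obtain ⟨h1, h2⟩ := pairUp_mem data p hp
      have hb : ∀ y : Int, y ∈ data ∨ y = 0 → max y 0 ≤ 4 * max c 0 := by
        intro y hy
        rcases hy with hy | rfl
        · have := hub y hy
          by_cases hm1 : 1 ≤ m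
          · have := hmc hm1; omega
          · omega
        · omega
      exact ⟨hb p.1 (Or.inl h1), hb p.2 h2⟩
    -- B side: rewrite the columns and transpose
    rw [colsB_eq]
    have hcols : (pairUp data).map (fun p => colChars c p.1 p.2)
        = (pairUp data).map (fun p => ((List.range N).map (fun k : Nat => rowChar p.1 p.2 (k:Int))).reverse) := by
      refine List.map_congr_left ?_
      intro p hp
      exact colChars_eq c p.1 p.2 (hbound p hp).1 (hbound p hp).2
    rw [hcols]
    have hpne := pairUp_ne_nil data hpre
    have hmne : (pairUp data).map (fun p => ((List.range N).map (fun k : Nat => rowChar p.1 p.2 (k:Int))).reverse) ≠ [] := by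
      simpa [List.map_eq_nil_iff] using hpne
    obtain ⟨c0, rest, hpu⟩ := List.exists_cons_of_ne_nil hmne
    rw [hpu]
    have hall : ∀ col ∈ c0 :: rest, col.length = N := by
      intro col hcol
      rw [← hpu, List.mem_map] at hcol
      obtain ⟨p, _, rfl⟩ := hcol
      simp
    have hc0 : c0.length = N := hall c0 (by simp)
    rw [show pyZipStar (c0 :: rest) = pyZipGo c0 (c0 :: rest) from rfl,
      pyZipGo_eq N c0 (c0 :: rest) hc0 hall (by simp), ← hpu]
    -- A side: unroll the fold
    rw [foldA (fun amt => String.mk ((pairUp data).map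
          (fun lr : Int × Int =>
            if 4 ≤ lr.1 - amt ∧ 4 ≤ lr.2 - amt then Char.ofNat 0x28FF
            else braille_char (lr.1 - amt) (lr.2 - amt))))]
    simp only [List.append_nil]
    rw [PySem.List.length_pyRange_one]
    have hlen : (c - 0).toNat = N := by simp [hN]
    rw [hlen, reverse_range_map, List.map_map]
    refine List.map_congr_left ?_
    intro k hk
    have hklt : k < N := List.mem_range.mp hk
    simp only [Function.comp_def]
    refine congrArg String.mk ?_
    rw [List.map_map]
    refine List.map_congr_left ?_
    intro p _
    simp only [Function.comp_def]
    -- left: A's cell at amount 4*(N-1-k); right: B's transposed cell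
    have hamt : (0 : Int) + 4 * ((N - 1 - k : Nat) : Int) = 4 * ((N - 1 - k : Nat) : Int) := by
      ring
    rw [hamt]
    have hA := cell_eq p.1 p.2 ((N - 1 - k : Nat) : Int)
    rw [hA]
    -- B's cell: reverse of the range map at index k
    have hklt2 : k < ((List.range N).map (fun j : Nat => rowChar p.1 p.2 (j:Int))).reverse.length := by
      simp [hklt]
    rw [List.getD_eq_getElem _ _ hklt2, List.getElem_reverse, List.getElem_map,
      List.getElem_range]
    congr 1
    simp only [List.length_map, List.length_range]

-- ===== VERDICT =====
-- (braille_columns_spec is stated and proved above, by name below for the required layout)
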